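-- pv_equiv track=rewrite | github.com/soyvv/zkbot | scripts/gen_proto_legacy_compat.py | common_token_prefix
-- ===== SOURCE A (Python) =====
-- def common_token_prefix(values: list[str]) -> str:
--     if len(values) < 2:
--         return ""
--     token_lists = [value.split("_") for value in values]
--     prefix: list[str] = []
--     for tokens in zip(*token_lists):
--         if len(set(tokens)) != 1:
--             break
--         prefix.append(tokens[0])
--     if not prefix:
--         return ""
--     return "_".join(prefix) + "_"
-- ===== SOURCE B (Python) =====
-- def common_token_prefix(values: list[str]) -> str:
--     if len(values) < 2:
--         return ""
--     prefix = values[0].split("_")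
--     for value in values[1:]:
--         prefix = _lcp(prefix, value.split("_"))
--     return "_".join(prefix) + "_" if prefix else ""
--
--
-- def _lcp(xs, ys):
--     if xs and ys and xs[0] == ys[0]:
--         return [xs[0]] + _lcp(xs[1:], ys[1:])
--     return []
-- ===== Notes on version B (the rewrite author's own statement) =====
-- stated objective: faster
-- what changed: Replaces the column-wise zip(*token_lists)+set-cardinality scan with a left fold that pairwise-reduces the running prefix against each token list via a longest-common-prefix helper; no transpose and no sets are built.
import Mathlib
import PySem

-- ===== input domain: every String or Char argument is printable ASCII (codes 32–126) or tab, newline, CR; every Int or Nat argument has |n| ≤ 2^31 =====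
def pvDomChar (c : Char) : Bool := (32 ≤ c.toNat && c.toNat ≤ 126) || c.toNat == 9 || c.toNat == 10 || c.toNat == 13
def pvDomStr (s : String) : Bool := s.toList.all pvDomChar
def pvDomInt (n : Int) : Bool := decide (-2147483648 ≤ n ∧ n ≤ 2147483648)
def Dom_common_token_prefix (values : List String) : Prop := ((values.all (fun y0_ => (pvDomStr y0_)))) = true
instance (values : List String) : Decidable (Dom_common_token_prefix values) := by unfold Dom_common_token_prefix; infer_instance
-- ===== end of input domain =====

-- B replaces the zip(*token_lists)+set-cardinality column scan with a pairwise
-- longest-common-prefix fold over the token lists (objective: simpler).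

-- ===== PORT A =====
-- value.split("_"): sep is the literal nonempty "_", so split? is always some
def pvSplit (v : String) : List String := (PySem.Str.split? v "_").getD []

-- zip(*token_lists): the columns, stopping at the shortest list
def pvColsA : List (List String) → List (List String)
  | [] => []
  | l :: rest =>
    if h : l.isEmpty || rest.any List.isEmpty then []
    else (l.head?.getD "" :: rest.map (fun r => r.head?.getD "")) :: pvColsA (l.tail :: rest.map List.tail)
  termination_by ls => (ls.headD []).length
  decreasing_by
    cases l with
    | nil => simp at h
    | cons b bs => exact Nat.lt_succ_self _

-- the for-loop with break: tokens[0] is the column head (columns are nonempty here)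
def pvLoopA : List (List String) → List String → List String
  | [], pref => pref
  | col :: rest, pref =>
    if (PySem.Set.ofList col).length ≠ 1 then pref
    else pvLoopA rest (pref ++ [col.head?.getD ""])

def common_token_prefix (values : List String) : String :=
  if values.length < 2 then ""
  else
    let token_lists := values.map (fun v => pvSplit v)
    let pref := pvLoopA (pvColsA token_lists) []
    if pref = [] then "" else PySem.Str.join "_" pref ++ "_"

-- ===== PORT B =====
def pvLcp2 : List String → List String → List String
  | x :: xs, y :: ys => if x = y then x :: pvLcp2 xs ys else []
  | _, _ => []

def common_token_prefix_alt (values : List String) : String :=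
  match values with
  | [] => ""
  | [_] => ""
  | v :: rest =>
    let pref := rest.foldl (fun acc w => pvLcp2 acc (pvSplit w)) (pvSplit v)
    if pref = [] then "" else PySem.Str.join "_" pref ++ "_"

-- ===== PRECONDITION & SPEC =====
def Spec_common_token_prefix (values : List String) (out : String) : Prop := out = common_token_prefix_alt values
instance (values : List String) (out : String) : Decidable (Spec_common_token_prefix values out) := by unfold Spec_common_token_prefix; infer_instance

-- ===== CLAIM (what is proved, stated in full; the proofs are below) =====
def Claim_equal_common_token_prefix : Prop := ∀ (values : List String), Dom_common_token_prefix values → Spec_common_token_prefix values (common_token_prefix values)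

-- ===== LEMMAS AND PROOFS =====

theorem pvLcp2_nil_left (y : List String) : pvLcp2 [] y = [] := by cases y <;> rfl

theorem pvLcp2_nil_right (x : List String) : pvLcp2 x [] = [] := by cases x <;> rfl

theorem foldl_lcp_nil (ls : List (List String)) : ls.foldl pvLcp2 [] = [] := by
  induction ls with
  | nil => rfl
  | cons l rest ih => simpa [pvLcp2_nil_left] using ih

theorem foldl_lcp_mem_nil (ls : List (List String)) (acc : List String)
    (h : [] ∈ ls) : ls.foldl pvLcp2 acc = [] := by
  induction ls generalizing acc with
  | nil => cases h
  | cons l rest ih =>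
    rcases List.mem_cons.mp h with h1 | h1
    · subst h1; simp [List.foldl_cons, pvLcp2_nil_right, foldl_lcp_nil]
    · exact ih _ h1

theorem foldl_lcp_cons (a : String) (ls : List (List String))
    (h : ∀ l ∈ ls, ∃ t, l = a :: t) (x' : List String) :
    ls.foldl pvLcp2 (a :: x') = a :: (ls.map List.tail).foldl pvLcp2 x' := by
  induction ls generalizing x' with
  | nil => rfl
  | cons l rest ih =>
    obtain ⟨t, rfl⟩ := h l (List.mem_cons_self ..)
    simp only [List.foldl_cons, List.map_cons, List.tail_cons, pvLcp2, if_pos]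
    exact ih (fun l hl => h l (List.mem_cons_of_mem _ hl)) _

theorem foldl_lcp_mismatch (a : String) (ls : List (List String))
    (h : ∃ l ∈ ls, l.head? ≠ some a) (x' : List String) :
    ls.foldl pvLcp2 (a :: x') = [] := by
  induction ls generalizing x' with
  | nil => simp at h
  | cons l rest ih =>
    by_cases hl : l.head? = some a
    · cases l with
      | nil => simp at hl
      | cons b t =>
        simp only [List.head?_cons, Option.some.injEq] at hl
        subst hl
        simp only [List.foldl_cons, pvLcp2, if_pos]
        rcases h with ⟨l', hl', hne⟩
        rcases List.mem_cons.mp hl' with h1 | h1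
        · subst h1; simp at hne
        · exact ih ⟨l', h1, hne⟩ _
    · cases l with
      | nil => simp [List.foldl_cons, pvLcp2_nil_right, foldl_lcp_nil]
      | cons b t =>
        simp only [List.head?_cons, Option.some.injEq] at hl
        simp only [List.foldl_cons, pvLcp2,
          if_neg (fun hba : a = b => hl hba.symm)]
        exact foldl_lcp_nil rest

theorem pvLoopA_acc (cols : List (List String)) (pref : List String) :
    pvLoopA cols pref = pref ++ pvLoopA cols [] := by
  induction cols generalizing pref with
  | nil => simp [pvLoopA]
  | cons col rest ih =>
    by_cases hc : (PySem.Set.ofList col).length ≠ 1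
    · simp [pvLoopA, hc]
    · simp only [pvLoopA, if_neg hc]
      rw [ih (pref ++ [col.head?.getD ""]), ih ([] ++ [col.head?.getD ""])]
      simp

theorem set_len_one (a : String) (hs : List String) :
    (PySem.Set.ofList (a :: hs)).length = 1 ↔ ∀ h ∈ hs, h = a := by
  have hamem : a ∈ PySem.Set.ofList (a :: hs) := by
    rw [PySem.Set.mem_ofList]; exact List.mem_cons_self ..
  constructor
  · intro h1 x hx
    have hmem : x ∈ PySem.Set.ofList (a :: hs) := by
      rw [PySem.Set.mem_ofList]; exact List.mem_cons_of_mem _ hx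
    rcases s : PySem.Set.ofList (a :: hs) with _ | ⟨b, _ | ⟨c, t⟩⟩
    · rw [s] at hamem; cases hamem
    · rw [s] at hmem hamem
      simp only [List.mem_singleton] at hmem hamem
      exact hmem.trans hamem.symm
    · rw [s] at h1; simp at h1
  · intro hall
    rcases s : PySem.Set.ofList (a :: hs) with _ | ⟨b, _ | ⟨c, t⟩⟩
    · rw [s] at hamem; cases hamem
    · rfl
    · exfalso
      have heq : ∀ x ∈ a :: hs, x = a := by
        intro x hx
        rcases List.mem_cons.mp hx with h | h
        · exact h
        · exact hall x h
      have hnd : (PySem.Set.ofList (a :: hs)).Nodup := PySem.Set.nodup_ofList _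
      rw [s] at hnd
      have hb : b = a := heq b (by rw [← PySem.Set.mem_ofList, s]; simp)
      have hc : c = a := heq c (by rw [← PySem.Set.mem_ofList, s]; simp)
      subst hb hc
      simp at hnd

theorem main_lemma (x : List String) (ls : List (List String)) :
    pvLoopA (pvColsA (x :: ls)) [] = ls.foldl pvLcp2 x := by
  induction x generalizing ls with
  | nil =>
    rw [pvColsA]
    simp [pvLoopA, foldl_lcp_nil]
  | cons a x' ih =>
    by_cases hE : ls.any List.isEmpty
    · rw [pvColsA, dif_pos (by simp [hE])]
      simp only [List.any_eq_true, List.isEmpty_iff] at hE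
      obtain ⟨l, hl, rfl⟩ := hE
      simp [pvLoopA, foldl_lcp_mem_nil ls _ hl]
    · rw [pvColsA, dif_neg (by simp [hE])]
      simp only [List.head?_cons, Option.getD_some, List.tail_cons]
      by_cases hall : ∀ l ∈ ls, l.head?.getD "" = a
      · have hset : (PySem.Set.ofList (a :: ls.map (fun r => r.head?.getD ""))).length = 1 := by
          rw [set_len_one]
          intro h hh
          obtain ⟨l, hl, rfl⟩ := List.mem_map.mp hh
          exact hall l hl
        rw [pvLoopA, if_neg (not_not.mpr hset)]
        rw [pvLoopA_acc, ih (ls.map List.tail)]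
        have hcons : ∀ l ∈ ls, ∃ t, l = a :: t := by
          intro l hl
          cases l with
          | nil =>
            exact absurd (List.any_eq_true.mpr ⟨[], hl, by simp⟩) hE
          | cons b t => exact ⟨t, by rw [← hall (b :: t) hl]; rfl⟩
        rw [foldl_lcp_cons a ls hcons x']
        simp
      · have hset : (PySem.Set.ofList (a :: ls.map (fun r => r.head?.getD ""))).length ≠ 1 := by
          rw [Ne, set_len_one]
          intro hc
          exact hall (fun l hl => hc _ (List.mem_map_of_mem hl))
        rw [pvLoopA, if_pos hset]
        simp only [not_forall] at hall
        obtain ⟨l, hl, hne⟩ := hall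
        have hh : l.head? ≠ some a := by
          cases l with
          | nil =>
            exact absurd (List.any_eq_true.mpr ⟨[], hl, by simp⟩) hE
          | cons b t =>
            simp only [List.head?_cons, Option.getD_some] at hne
            simp [hne]
        rw [foldl_lcp_mismatch a ls ⟨l, hl, hh⟩ x']

-- ===== VERDICT (by name: the statement is the Claim_ definition above) =====
theorem common_token_prefix_spec : Claim_equal_common_token_prefix := by
  intro values _
  unfold Spec_common_token_prefix common_token_prefix common_token_prefix_alt
  match values with
  | [] => rfl
  | [v] => rfl
  | v :: r :: rest =>
    simp only [List.length_cons, List.map_cons]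
    rw [if_neg (by omega)]
    have h := main_lemma (pvSplit v) ((r :: rest).map (fun w => pvSplit w))
    rw [List.foldl_map] at h
    simp only [List.map_cons] at h
    rw [h]
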